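-- pv_equiv track=rewrite | github.com/NiMenRo/Proyecto-I-ADA | algoritmos/smart_terminal_voraz.py | mejor_opcion
-- ===== SOURCE A (Python) =====
-- def mejor_opcion(evaluaciones):
--     mejor = None
--     max_coincidencias = -1
--     max_longitud = -1  # Para manejar caracteres excedentes
--
--     for evaluacion in evaluaciones:
--         cadena, pos, operacion, coincidencias = evaluacion
--
--         # Priorizar más coincidencias
--         if coincidencias > max_coincidencias:
--             mejor = evaluacion
--             max_coincidencias = coincidencias
--             max_longitud = len(cadena)
--         elif coincidencias == max_coincidencias:
--             # Si las coincidencias son iguales, preferir menor longitud (eliminar excedentes)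
--             if len(cadena) < max_longitud:
--                 mejor = evaluacion
--                 max_longitud = len(cadena)
--
--     return mejor
-- ===== SOURCE B (Python) =====
-- def mejor_opcion(evaluaciones):
--     if not evaluaciones:
--         return None
--     return sorted(evaluaciones, key=lambda e: (-e[3], len(e[0])))[0]
-- ===== Notes on version B (the rewrite author's own statement) =====
-- stated objective: simpler
-- what changed: Replaces the scan with running maxima and -1 sentinels by a stable sort on the key (-coincidencias, len(cadena)) and taking the first element; stability reproduces A's keep-the-first tie-breaking.
-- intended difference: On nonempty lists in which every element has coincidencias < 0, A's -1 sentinels make it return None (or skip such elements), while B returns the genuinely best element (max coincidencias, then min length, first wins), which is the intended selection. — e.g. on mejor_opcion([("a", 0, "x", -1)]): A returns none, B returns some ("a", 0, "x", -1)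
import Mathlib
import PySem

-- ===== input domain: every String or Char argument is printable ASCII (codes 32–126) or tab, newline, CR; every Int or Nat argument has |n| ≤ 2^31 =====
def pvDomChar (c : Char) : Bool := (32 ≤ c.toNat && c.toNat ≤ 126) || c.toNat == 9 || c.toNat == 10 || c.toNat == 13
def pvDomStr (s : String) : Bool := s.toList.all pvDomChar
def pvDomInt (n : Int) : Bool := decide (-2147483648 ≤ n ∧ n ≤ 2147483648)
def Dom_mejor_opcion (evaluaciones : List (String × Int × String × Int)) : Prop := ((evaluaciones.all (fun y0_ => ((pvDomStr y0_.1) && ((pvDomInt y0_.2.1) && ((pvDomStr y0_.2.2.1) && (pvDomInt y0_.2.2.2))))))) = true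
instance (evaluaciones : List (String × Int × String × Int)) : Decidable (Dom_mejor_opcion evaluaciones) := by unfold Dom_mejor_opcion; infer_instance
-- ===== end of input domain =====

-- B replaces A's sentinel-tracking scan by a stable sort on (-coincidencias, len) and takes the head: simpler, and correct on all-negative coincidencias where A's -1 sentinels return None.

-- ===== PORT A =====
def mejor_opcion (evaluaciones : List (String × Int × String × Int)) : Option (String × Int × String × Int) :=
  (evaluaciones.foldl
    (fun s evaluacion =>
      let mejor := s.1
      let max_coincidencias := s.2.1
      let max_longitud := s.2.2
      let cadena := evaluacion.1
      let coincidencias := evaluacion.2.2.2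
      if coincidencias > max_coincidencias then
        (some evaluacion, coincidencias, PySem.Str.len cadena)
      else if coincidencias = max_coincidencias then
        if PySem.Str.len cadena < max_longitud then
          (some evaluacion, max_coincidencias, PySem.Str.len cadena)
        else (mejor, max_coincidencias, max_longitud)
      else (mejor, max_coincidencias, max_longitud))
    (none, -1, -1)).1

-- ===== PORT B =====
def mejor_opcion_alt (evaluaciones : List (String × Int × String × Int)) : Option (String × Int × String × Int) :=
  match evaluaciones with
  | [] => none
  | _ =>
    match PySem.List.sorted2 evaluaciones (fun e => -e.2.2.2) (fun e => PySem.Str.len e.1) with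
    | [] => none   -- unreachable: sorted2 of a nonempty list is nonempty
    | m :: _ => some m

-- ===== PRECONDITION & SPEC =====
-- On nonempty lists in which every element has coincidencias < 0, A's -1 sentinels make it return None, while B returns the genuinely best element (max coincidencias, then min length, first wins), the intended selection.
def D_mejor_opcion (evaluaciones : List (String × Int × String × Int)) : Prop :=
  evaluaciones ≠ [] ∧ ∀ e ∈ evaluaciones, e.2.2.2 < 0
instance (evaluaciones : List (String × Int × String × Int)) : Decidable (D_mejor_opcion evaluaciones) := by unfold D_mejor_opcion; infer_instance

def Spec_mejor_opcion (evaluaciones : List (String × Int × String × Int)) (out : Option (String × Int × String × Int)) : Prop := ¬ D_mejor_opcion evaluaciones → out = mejor_opcion_alt evaluaciones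
instance (evaluaciones : List (String × Int × String × Int)) (out : Option (String × Int × String × Int)) : Decidable (Spec_mejor_opcion evaluaciones out) := by unfold Spec_mejor_opcion; infer_instance

def pvDiffWitness_mejor_opcion : (List (String × Int × String × Int)) := [("a", 0, "x", -1)]
def pvDiffWitnessOut_mejor_opcion : (Option (String × Int × String × Int)) × (Option (String × Int × String × Int)) :=
  (none, some ("a", 0, "x", -1))

-- ===== CLAIM (what is proved, stated in full; the proofs are below) =====
def Claim_unchanged_mejor_opcion : Prop := ∀ (evaluaciones : List (String × Int × String × Int)), Dom_mejor_opcion evaluaciones → Spec_mejor_opcion evaluaciones (mejor_opcion evaluaciones)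
def Claim_changed_mejor_opcion : Prop := Dom_mejor_opcion (pvDiffWitness_mejor_opcion) ∧ D_mejor_opcion (pvDiffWitness_mejor_opcion) ∧ mejor_opcion (pvDiffWitness_mejor_opcion) = pvDiffWitnessOut_mejor_opcion.1 ∧ mejor_opcion_alt (pvDiffWitness_mejor_opcion) = pvDiffWitnessOut_mejor_opcion.2 ∧ pvDiffWitnessOut_mejor_opcion.1 ≠ pvDiffWitnessOut_mejor_opcion.2
def Claim_exact_mejor_opcion : Prop := ∀ (evaluaciones : List (String × Int × String × Int)), Dom_mejor_opcion evaluaciones → D_mejor_opcion evaluaciones → mejor_opcion evaluaciones ≠ mejor_opcion_alt evaluaciones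

-- ===== LEMMAS AND PROOFS =====

-- A's fold step and B's insertion comparator, named for the proofs
def pvStepA (s : Option (String × Int × String × Int) × Int × Int) (evaluacion : String × Int × String × Int) :
    Option (String × Int × String × Int) × Int × Int :=
  if evaluacion.2.2.2 > s.2.1 then (some evaluacion, evaluacion.2.2.2, PySem.Str.len evaluacion.1)
  else if evaluacion.2.2.2 = s.2.1 then
    if PySem.Str.len evaluacion.1 < s.2.2 then (some evaluacion, s.2.1, PySem.Str.len evaluacion.1)
    else (s.1, s.2.1, s.2.2)
  else (s.1, s.2.1, s.2.2)

def pvBefore (a b : String × Int × String × Int) : Bool :=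
  decide (-a.2.2.2 < -b.2.2.2) || (!decide (-b.2.2.2 < -a.2.2.2) && decide (PySem.Str.len a.1 < PySem.Str.len b.1))

theorem pvBefore_iff (x m : String × Int × String × Int) :
    pvBefore x m = true ↔ (m.2.2.2 < x.2.2.2 ∨ (x.2.2.2 = m.2.2.2 ∧ PySem.Str.len x.1 < PySem.Str.len m.1)) := by
  simp only [pvBefore, Bool.or_eq_true, Bool.and_eq_true, Bool.not_eq_true', decide_eq_true_eq,
    decide_eq_false_iff_not]
  omega

theorem pvA_eq (l : List (String × Int × String × Int)) :
    mejor_opcion l = (l.foldl pvStepA (none, -1, -1)).1 := by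
  rfl

theorem pvB_eq (l : List (String × Int × String × Int)) :
    PySem.List.sorted2 l (fun e => -e.2.2.2) (fun e => PySem.Str.len e.1) =
      l.foldl (fun acc x => PySem.List.insertBy pvBefore x acc) [] := rfl

theorem pvLen_nonneg (s : String) : (0 : Int) ≤ PySem.Str.len s := by
  simp [PySem.Str.len]

theorem pvMem_foldl (l : List (String × Int × String × Int)) :
    ∀ y ∈ l.foldl (fun acc x => PySem.List.insertBy pvBefore x acc) [], y ∈ l := by
  intro y hy
  rw [← pvB_eq] at hy
  exact (PySem.List.sorted2_perm l _ _ false).mem_iff.mp hy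

theorem pvNeg (l : List (String × Int × String × Int)) (h : ∀ e ∈ l, e.2.2.2 < 0) :
    l.foldl pvStepA (none, -1, -1) = (none, -1, -1) := by
  induction l with
  | nil => rfl
  | cons a as ih =>
    have ha : a.2.2.2 < 0 := h a (by simp)
    have hlen : (0 : Int) ≤ PySem.Str.len a.1 := pvLen_nonneg a.1
    have hstep : pvStepA (none, -1, -1) a = (none, -1, -1) := by
      simp only [pvStepA]
      split_ifs <;> first | rfl | (exfalso; omega)
    simp only [List.foldl_cons, hstep]
    exact ih (fun e he => h e (by simp [he]))

theorem pvInv (l : List (String × Int × String × Int)) (h : ∃ e ∈ l, 0 ≤ e.2.2.2) :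
    ∃ m t, l.foldl (fun acc x => PySem.List.insertBy pvBefore x acc) [] = m :: t ∧
      l.foldl pvStepA (none, -1, -1) = (some m, m.2.2.2, PySem.Str.len m.1) := by
  induction l using List.reverseRecOn with
  | nil => simp at h
  | append_singleton l x ih =>
    simp only [List.foldl_append, List.foldl_cons, List.foldl_nil]
    by_cases hneg : ∀ e ∈ l, e.2.2.2 < 0
    · -- everything before x is negative, so x must be the nonnegative one and wins
      have hx : 0 ≤ x.2.2.2 := by
        rcases h with ⟨e, he, hec⟩
        rcases List.mem_append.mp he with h1 | h1
        · exact absurd hec (by have := hneg e h1; omega)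
        · simp at h1; subst h1; exact hec
      rw [pvNeg l hneg]
      have hstep : pvStepA (none, -1, -1) x = (some x, x.2.2.2, PySem.Str.len x.1) := by
        simp only [pvStepA]
        split_ifs <;> first | rfl | (exfalso; omega)
      cases hacc : l.foldl (fun acc x => PySem.List.insertBy pvBefore x acc) [] with
      | nil => exact ⟨x, [], by simp [PySem.List.insertBy], hstep⟩
      | cons y ys =>
        have hy : y.2.2.2 < 0 := hneg y (pvMem_foldl l y (by rw [hacc]; simp))
        have hb : pvBefore x y = true := (pvBefore_iff x y).mpr (by omega)
        exact ⟨x, y :: ys, by simp [PySem.List.insertBy, hb], hstep⟩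
    · push_neg at hneg
      rcases hneg with ⟨e, he, hec⟩
      rcases ih ⟨e, he, by omega⟩ with ⟨m, t, hB, hA⟩
      rw [hB, hA]
      by_cases hpick : m.2.2.2 < x.2.2.2 ∨ (x.2.2.2 = m.2.2.2 ∧ PySem.Str.len x.1 < PySem.Str.len m.1)
      · have hb : pvBefore x m = true := (pvBefore_iff x m).mpr hpick
        have hstep : pvStepA (some m, m.2.2.2, PySem.Str.len m.1) x = (some x, x.2.2.2, PySem.Str.len x.1) := by
          simp only [pvStepA]
          split_ifs with h1 h2 h3
          · rfl
          · simp [h2]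
          · exfalso
            rcases hpick with h | ⟨_, hl⟩
            · omega
            · exact h3 hl
          · exfalso
            rcases hpick with h | ⟨heq, _⟩
            · omega
            · exact h2 heq
        exact ⟨x, m :: t, by simp [PySem.List.insertBy, hb], hstep⟩
      · push_neg at hpick
        obtain ⟨hle, himp⟩ := hpick
        have hb : pvBefore x m = false :=
          Bool.eq_false_iff.mpr (by intro hbt; rw [pvBefore_iff] at hbt; omega)
        have hstep : pvStepA (some m, m.2.2.2, PySem.Str.len m.1) x = (some m, m.2.2.2, PySem.Str.len m.1) := by
          simp only [pvStepA]
          split_ifs with h1 h2 h3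
          · exfalso; omega
          · exfalso; have := himp h2; omega
          · rfl
          · rfl
        exact ⟨m, PySem.List.insertBy pvBefore x t, by simp [PySem.List.insertBy, hb], hstep⟩

theorem pvAlt_of_sorted (a : String × Int × String × Int) (l : List (String × Int × String × Int))
    (m : String × Int × String × Int) (t : List (String × Int × String × Int))
    (h : PySem.List.sorted2 (a :: l) (fun e => -e.2.2.2) (fun e => PySem.Str.len e.1) = m :: t) :
    mejor_opcion_alt (a :: l) = some m := by
  simp only [mejor_opcion_alt, h]

-- ===== VERDICT (by name: the statement is the Claim_ definition above) =====
theorem mejor_opcion_spec : Claim_unchanged_mejor_opcion := by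
  intro l _ hnD
  unfold D_mejor_opcion at hnD
  cases l with
  | nil => rfl
  | cons a as =>
    push_neg at hnD
    rcases hnD (by simp) with ⟨e, he, hec⟩
    rcases pvInv (a :: as) ⟨e, he, by omega⟩ with ⟨m, t, hB, hA⟩
    rw [pvA_eq, hA, pvAlt_of_sorted a as m t (by rw [pvB_eq]; exact hB)]

theorem mejor_opcion_changed : Claim_changed_mejor_opcion := by unfold Claim_changed_mejor_opcion; decide

theorem mejor_opcion_tight : Claim_exact_mejor_opcion := by
  intro l _ hD
  rcases hD with ⟨hne, hneg⟩
  have hA : mejor_opcion l = none := by rw [pvA_eq, pvNeg l hneg]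
  cases l with
  | nil => exact absurd rfl hne
  | cons a as =>
    cases hs : PySem.List.sorted2 (a :: as) (fun e => -e.2.2.2) (fun e => PySem.Str.len e.1) with
    | nil =>
      have hp := PySem.List.sorted2_perm (a :: as) (fun e => -e.2.2.2) (fun e => PySem.Str.len e.1) false
      rw [hs] at hp
      exact absurd hp.symm.eq_nil (by simp)
    | cons m t =>
      rw [hA, pvAlt_of_sorted a as m t hs]
      simp
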